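-- pv_equiv track=rewrite | github.com/Banandana/KiCAD-MCP-Server-Remixed | python/commands/group_analysis.py | _find_block_end_str_aware
-- ===== SOURCE A (Python) =====
-- def _find_block_end_str_aware(s, start):
--     """Find end of balanced paren block starting at s[start]='('.
--     String-aware: skips parens inside quoted strings."""
--     depth = 0
--     i = start
--     in_str = False
--     while i < len(s):
--         ch = s[i]
--         if in_str:
--             if ch == '\\':
--                 i += 2
--                 continue
--             elif ch == '"':
--                 in_str = False
--         else:
--             if ch == '"':
--                 in_str = True
--             elif ch == '(':
--                 depth += 1
--             elif ch == ')':
--                 depth -= 1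
--                 if depth == 0:
--                     return i + 1
--         i += 1
--     return len(s)
-- ===== SOURCE B (Python) =====
-- def _paren_tokens(s, start):
--     """Stage 1: lex s[start:] into a list of (position, char) paren tokens,
--     dropping everything else; quoted string literals (with backslash escapes)
--     are consumed wholesale so their parens never become tokens."""
--     toks = []
--     i = start
--     n = len(s)
--     while i < n:
--         c = s[i]
--         if c == '"':
--             i += 1
--             while i < n:
--                 if s[i] == '\\':
--                     i += 2
--                 elif s[i] == '"':
--                     i += 1
--                     break
--                 else:
--                     i += 1
--         else:
--             if c in '()':
--                 toks.append((i, c))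
--             i += 1
--     return toks
--
--
-- def _find_block_end_str_aware(s, start):
--     """Find end of balanced paren block starting at s[start]='('.
--     String-aware: skips parens inside quoted strings."""
--     depth = 0
--     for pos, c in _paren_tokens(s, start):
--         if c == '(':
--             depth += 1
--         else:
--             depth -= 1
--             if depth == 0:
--                 return pos + 1
--     return len(s)
-- ===== Notes on version B (the rewrite author's own statement) =====
-- stated objective: alternative
-- what changed: Replaces A's single-pass state machine (depth counter and in_str flag advanced together per character) by two staged passes over different data: a lexer first materialises a list of (position, paren) tokens with string literals consumed wholesale, then a separate fold over that token list tracks only the depth and returns pos+1 when it hits 0.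
import Mathlib
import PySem

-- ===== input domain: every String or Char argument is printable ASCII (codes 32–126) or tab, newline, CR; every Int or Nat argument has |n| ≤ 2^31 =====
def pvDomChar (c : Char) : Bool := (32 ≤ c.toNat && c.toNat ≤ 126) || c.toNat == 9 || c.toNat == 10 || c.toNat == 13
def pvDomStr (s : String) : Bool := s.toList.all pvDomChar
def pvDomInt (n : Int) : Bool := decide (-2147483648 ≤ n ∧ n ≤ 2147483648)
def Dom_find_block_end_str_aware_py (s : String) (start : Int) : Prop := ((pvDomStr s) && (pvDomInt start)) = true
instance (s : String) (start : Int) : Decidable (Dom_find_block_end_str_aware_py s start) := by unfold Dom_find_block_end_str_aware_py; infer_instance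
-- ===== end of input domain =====

-- B replaces A's one-pass depth+in_str state machine by two staged passes: a lexer
-- producing the list of paren tokens (string literals consumed wholesale), then a
-- depth fold over that token list; same O(n) cost (objective: alternative).

-- ===== PORT A =====
-- A's while loop: state (i, depth, in_str); the `none` branch is Python's IndexError
-- on s[i] with i < -len(s), excluded by Pre_ below (its value is arbitrary)
def fbeLoopA (s : List Char) (n : Nat) (i depth : Int) (in_str : Bool) : Int :=
  if _h : i < (n : Int) then
    match PySem.List.pyGet? s i with
    | none => 0
    | some ch =>
      if in_str then
        if ch = '\\' then fbeLoopA s n (i + 2) depth true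
        else if ch = '"' then fbeLoopA s n (i + 1) depth false
        else fbeLoopA s n (i + 1) depth true
      else
        if ch = '"' then fbeLoopA s n (i + 1) depth true
        else if ch = '(' then fbeLoopA s n (i + 1) (depth + 1) false
        else if ch = ')' then
          if depth - 1 = 0 then i + 1
          else fbeLoopA s n (i + 1) (depth - 1) false
        else fbeLoopA s n (i + 1) depth false
  else (n : Int)
termination_by ((n : Int) - i).toNat
decreasing_by all_goals (simp_wf; omega)

def find_block_end_str_aware_py (s : String) (start : Int) : Int :=
  fbeLoopA s.toList s.toList.length start 0 false

-- ===== PORT B =====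
-- Source B's inner string-consuming while loop of _paren_tokens: returns the index just
-- past the literal; the `none` branch is Python's IndexError (s[j] with j < -len(s)),
-- unreachable under Pre_ (its value is arbitrary)
def skipStrB (s : List Char) (n : Nat) (j : Int) : Int :=
  if _h : j < (n : Int) then
    match PySem.List.pyGet? s j with
    | none => j
    | some c =>
      if c = '\\' then skipStrB s n (j + 2)
      else if c = '"' then j + 1
      else skipStrB s n (j + 1)
  else j
termination_by ((n : Int) - j).toNat
decreasing_by all_goals (simp_wf; omega)

-- cited by tokensB's decreasing_by
theorem skipStrB_ge (s : List Char) (n : Nat) (j : Int) : j ≤ skipStrB s n j := by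
  fun_induction skipStrB s n j <;> omega

-- Source B's _paren_tokens outer loop: builds the token list (append = cons at recursion)
def tokensB (s : List Char) (n : Nat) (i : Int) : List (Int × Char) :=
  if _h : i < (n : Int) then
    match PySem.List.pyGet? s i with
    | none => []
    | some c =>
      if c = '"' then tokensB s n (skipStrB s n (i + 1))
      else if c = '(' ∨ c = ')' then (i, c) :: tokensB s n (i + 1)
      else tokensB s n (i + 1)
  else []
termination_by ((n : Int) - i).toNat
decreasing_by
  · have := skipStrB_ge s n (i + 1); simp_wf; omega
  all_goals (simp_wf; omega)

-- Source B's for loop over the tokens, tracking only depth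
def scanB (n : Nat) (toks : List (Int × Char)) (depth : Int) : Int :=
  match toks with
  | [] => (n : Int)
  | (pos, c) :: rest =>
    if c = '(' then scanB n rest (depth + 1)
    else if depth - 1 = 0 then pos + 1
    else scanB n rest (depth - 1)

def find_block_end_str_aware_py_alt (s : String) (start : Int) : Int :=
  scanB s.toList.length (tokensB s.toList s.toList.length start) 0

-- ===== PRECONDITION & SPEC =====
-- Pre_ excludes exactly the inputs where Python A raises IndexError (s[start] with
-- start < -len(s)); Python B raises the same IndexError there.
def Pre_find_block_end_str_aware_py (s : String) (start : Int) : Prop :=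
  -(s.toList.length : Int) ≤ start
instance (s : String) (start : Int) : Decidable (Pre_find_block_end_str_aware_py s start) := by
  unfold Pre_find_block_end_str_aware_py; infer_instance

def pvWitness_find_block_end_str_aware_py : String × Int := ("(a)", 0)

def Spec_find_block_end_str_aware_py (s : String) (start : Int) (out : Int) : Prop := out = find_block_end_str_aware_py_alt s start
instance (s : String) (start : Int) (out : Int) : Decidable (Spec_find_block_end_str_aware_py s start out) := by unfold Spec_find_block_end_str_aware_py; infer_instance

-- ===== CLAIM (what is proved, stated in full; the proofs are below) =====
def Claim_equal_find_block_end_str_aware_py : Prop := ∀ (s : String) (start : Int), Dom_find_block_end_str_aware_py s start → Pre_find_block_end_str_aware_py s start → Spec_find_block_end_str_aware_py s start (find_block_end_str_aware_py s start)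

-- ===== LEMMAS AND PROOFS =====

-- an in-range index always yields a character
theorem pyGet?_some_of_inrange (s : List Char) (j : Int)
    (h1 : -(s.length : Int) ≤ j) (h2 : j < (s.length : Int)) :
    ∃ c, PySem.List.pyGet? s j = some c := by
  cases h : PySem.List.pyGet? s j with
  | some c => exact ⟨c, rfl⟩
  | none =>
    rw [PySem.List.pyGet?_eq_none_iff] at h
    exact absurd (by simp [PySem.Raise.InRange]; omega) h

-- A's in-string scanning lands at B's skipStrB index, back out of string state
theorem loopA_instr_eq (s : List Char) :
    ∀ m : Nat, ∀ j depth : Int, ((s.length : Int) - j).toNat = m → -(s.length : Int) ≤ j →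
    fbeLoopA s s.length j depth true = fbeLoopA s s.length (skipStrB s s.length j) depth false := by
  intro m
  induction m using Nat.strong_induction_on with
  | _ m ih =>
    intro j depth hm hge
    by_cases h : j < (s.length : Int)
    · obtain ⟨c, hc⟩ := pyGet?_some_of_inrange s j hge h
      rw [fbeLoopA, skipStrB, dif_pos h, dif_pos h, hc]
      by_cases hbs : c = '\\'
      · simp only [hbs, if_true]
        exact ih _ (by omega) (j + 2) depth rfl (by omega)
      · by_cases hq : c = '"'
        · simp [hq]
        · simp only [hbs, hq, if_false, if_true]
          exact ih _ (by omega) (j + 1) depth rfl (by omega)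
    · rw [fbeLoopA, skipStrB, dif_neg h, dif_neg h, fbeLoopA, dif_neg h]

-- main equivalence: A's fused loop = B's depth fold over B's token list
theorem loop_eq (s : List Char) :
    ∀ m : Nat, ∀ i depth : Int, ((s.length : Int) - i).toNat = m → -(s.length : Int) ≤ i →
    fbeLoopA s s.length i depth false = scanB s.length (tokensB s s.length i) depth := by
  intro m
  induction m using Nat.strong_induction_on with
  | _ m ih =>
    intro i depth hm hge
    by_cases h : i < (s.length : Int)
    · obtain ⟨c, hc⟩ := pyGet?_some_of_inrange s i hge h
      rw [fbeLoopA, tokensB, dif_pos h, dif_pos h, hc]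
      by_cases hq : c = '"'
      · simp only [hq, Bool.false_eq_true, if_false, if_true]
        rw [loopA_instr_eq s ((s.length : Int) - (i + 1)).toNat (i + 1) depth rfl (by omega)]
        have hsk := skipStrB_ge s s.length (i + 1)
        exact ih _ (by omega) _ depth rfl (by omega)
      · by_cases hp : c = '('
        · have hr := ih _ (by omega) (i + 1) (depth + 1) rfl (by omega)
          simp [hp, scanB, hr]
        · by_cases hcl : c = ')'
          · by_cases hz : depth - 1 = 0
            · simp [hcl, hz, scanB]
            · have hr := ih _ (by omega) (i + 1) (depth - 1) rfl (by omega)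
              simp [hcl, hz, scanB, hr]
          · have hr := ih _ (by omega) (i + 1) depth rfl (by omega)
            simp [hq, hp, hcl, hr]
    · rw [fbeLoopA, tokensB, dif_neg h, dif_neg h, scanB]

-- ===== VERDICT (by name: the statement is the Claim_ definition above) =====
theorem find_block_end_str_aware_py_spec : Claim_equal_find_block_end_str_aware_py := by
  intro s start _ hpre
  unfold Spec_find_block_end_str_aware_py find_block_end_str_aware_py find_block_end_str_aware_py_alt
  exact loop_eq s.toList ((s.toList.length : Int) - start).toNat start 0 rfl hpre
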